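-- pv_equiv track=rewrite | github.com/Michaeloye/DSA | leetcodeDailyChallenge/2025/march/MinimumRecolorstoGetKConsecutiveBlackBlocks.py | maximumRecolors
-- ===== SOURCE A (Python) =====
-- def maximumRecolors(blocks: str, k: int) -> int:
--     wCount = 0
--     ans = 0
--     left = 0
--
--     for right in range(len(blocks)):
--         if blocks[right] == 'W':
--             wCount += 1
--
--         if right - left + 1 == k:
--             ans = max(ans, wCount)
--
--             if blocks[left] == 'W':
--                 wCount -= 1
--             left += 1
--
--     return ans
-- ===== SOURCE B (Python) =====
-- def maximumRecolors(blocks: str, k: int) -> int: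
--     n = len(blocks)
--     if k <= 0 or k > n:
--         return 0
--     P = [0]
--     for c in blocks:
--         P.append(P[-1] + (1 if c == 'W' else 0))
--     ans = 0
--     for i in range(n - k + 1):
--         ans = max(ans, P[i + k] - P[i])
--     return ans
-- ===== Notes on version B (the rewrite author's own statement) =====
-- stated objective: alternative
-- what changed: Replaces A's sliding-window loop (wCount/left state updated per character) with a prefix-count array built in one pass followed by a max over the k-window prefix differences, with an explicit guard returning 0 when k <= 0 or k > len(blocks).
import Mathlib
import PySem

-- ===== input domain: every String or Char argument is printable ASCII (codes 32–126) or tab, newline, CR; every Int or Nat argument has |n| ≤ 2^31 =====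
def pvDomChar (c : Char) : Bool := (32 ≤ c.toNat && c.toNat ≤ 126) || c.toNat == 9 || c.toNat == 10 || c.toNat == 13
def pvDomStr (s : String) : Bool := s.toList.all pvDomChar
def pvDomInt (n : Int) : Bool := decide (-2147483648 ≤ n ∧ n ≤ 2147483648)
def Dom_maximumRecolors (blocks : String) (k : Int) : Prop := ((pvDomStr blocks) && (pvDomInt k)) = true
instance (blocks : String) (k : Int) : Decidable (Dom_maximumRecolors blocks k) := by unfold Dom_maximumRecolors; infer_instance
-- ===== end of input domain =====

-- B replaces A's sliding window by a prefix-count array and a max over the k-window differences (objective: alternative, same value).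

-- ===== PORT A =====
-- sliding window: state (wCount, ans, left), one step per `right` in range(len(blocks))
def maximumRecolors (blocks : String) (k : Int) : Int :=
  let cs := blocks.toList
  let st := (PySem.List.pyRange 0 (cs.length : Int) 1).foldl
    (fun (s : Int × Int × Int) right =>
      let w := if PySem.List.pyGet? cs right = some 'W' then s.1 + 1 else s.1
      if right - s.2.2 + 1 = k then
        (if PySem.List.pyGet? cs s.2.2 = some 'W' then w - 1 else w, max s.2.1 w, s.2.2 + 1)
      else (w, s.2.1, s.2.2)) (0, 0, 0)
  st.2.1

-- ===== PORT B =====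
-- prefix-count list: pvPrefix acc cs = [acc, acc + #W in cs[:1], …, acc + #W in cs]
def pvPrefix (acc : Int) : List Char → List Int
  | [] => [acc]
  | c :: cs => acc :: pvPrefix (acc + if c = 'W' then 1 else 0) cs

def maximumRecolors_alt (blocks : String) (k : Int) : Int :=
  let cs := blocks.toList
  let n : Int := (cs.length : Int)
  if k ≤ 0 ∨ n < k then 0
  else
    let P := pvPrefix 0 cs
    (PySem.List.pyRange 0 (n - k + 1) 1).foldl
      (fun a i => max a (PySem.List.pyGetD P (i + k) 0 - PySem.List.pyGetD P i 0)) 0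

-- ===== PRECONDITION & SPEC =====
def Spec_maximumRecolors (blocks : String) (k : Int) (out : Int) : Prop := out = maximumRecolors_alt blocks k
instance (blocks : String) (k : Int) (out : Int) : Decidable (Spec_maximumRecolors blocks k out) := by unfold Spec_maximumRecolors; infer_instance

-- ===== CLAIM (what is proved, stated in full; the proofs are below) =====
def Claim_equal_maximumRecolors : Prop := ∀ (blocks : String) (k : Int), Dom_maximumRecolors blocks k → Spec_maximumRecolors blocks k (maximumRecolors blocks k)

-- ===== LEMMAS AND PROOFS =====

-- number of 'W' among the first i characters
def pvW (cs : List Char) (i : Nat) : Int := ((cs.take i).countP (fun c => c = 'W') : Int)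

lemma pvW_zero (cs : List Char) : pvW cs 0 = 0 := by simp [pvW]

lemma pvW_succ (cs : List Char) (r : Nat) (h : r < cs.length) :
    pvW cs (r + 1) = pvW cs r + (if cs[r] = 'W' then 1 else 0) := by
  simp only [pvW, List.take_add_one, List.countP_append, List.getElem?_eq_getElem h]
  split_ifs with hw <;> simp [hw]

lemma pvW_cons (c : Char) (cs : List Char) (j : Nat) :
    pvW (c :: cs) (j + 1) = (if c = 'W' then 1 else 0) + pvW cs j := by
  simp only [pvW, List.take_succ_cons, List.countP_cons, decide_eq_true_eq]
  push_cast
  split_ifs with hw <;> ring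

lemma pvPrefix_get (cs : List Char) (acc : Int) (i : Int) (h0 : 0 ≤ i)
    (h1 : i ≤ (cs.length : Int)) :
    PySem.List.pyGetD (pvPrefix acc cs) i 0 = acc + pvW cs i.toNat := by
  induction cs generalizing acc i with
  | nil =>
    have : i = 0 := by simp at h1; omega
    simp [this, pvPrefix, pvW, PySem.List.pyGetD_zero_cons]
  | cons c cs ih =>
    rcases eq_or_lt_of_le h0 with h | h
    · simp [pvPrefix, ← h, pvW, PySem.List.pyGetD_zero_cons]
    · rcases Int.eq_ofNat_of_zero_le (by omega : (0:Int) ≤ i - 1) with ⟨m, hm⟩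
      have hstep : PySem.List.pyGetD (pvPrefix acc (c :: cs)) i 0
          = PySem.List.pyGetD (pvPrefix (acc + if c = 'W' then 1 else 0) cs) (i - 1) 0 := by
        rw [pvPrefix, show i = ((m + 1 : Nat) : Int) by omega,
            show ((m + 1 : Nat) : Int) - 1 = ((m : Nat) : Int) by push_cast; ring,
            PySem.List.pyGetD_natCast, PySem.List.pyGetD_natCast]
        simp [List.getD]
      rw [hstep, ih _ _ (by omega) (by simp at h1 ⊢; omega)]
      rw [show i.toNat = (i - 1).toNat + 1 by omega, pvW_cons]
      ring

-- A's loop step, named for the proofs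
def pvStepA (cs : List Char) (k : Int) (s : Int × Int × Int) (right : Int) : Int × Int × Int :=
  let w := if PySem.List.pyGet? cs right = some 'W' then s.1 + 1 else s.1
  if right - s.2.2 + 1 = k then
    (if PySem.List.pyGet? cs s.2.2 = some 'W' then w - 1 else w, max s.2.1 w, s.2.2 + 1)
  else (w, s.2.1, s.2.2)

lemma maximumRecolors_eq_fold (blocks : String) (k : Int) :
    maximumRecolors blocks k
      = ((PySem.List.pyRange 0 (blocks.toList.length : Int) 1).foldl
          (pvStepA blocks.toList k) (0, 0, 0)).2.1 := rfl

-- the running maximum B computes after scanning windows starting at 0 … m-1 (empty fold for m ≤ 0)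
def pvAnsF (cs : List Char) (k m : Int) : Int :=
  (PySem.List.pyRange 0 m 1).foldl
    (fun a i => max a (pvW cs (i + k).toNat - pvW cs i.toNat)) 0

lemma pvAnsF_succ (cs : List Char) (k m : Int) (hm : 0 ≤ m) :
    pvAnsF cs k (m + 1)
      = max (pvAnsF cs k m) (pvW cs (m + k).toNat - pvW cs m.toNat) := by
  unfold pvAnsF
  rw [PySem.List.pyRange_one_succ_right hm, List.foldl_append]
  simp

-- degenerate case: k ≤ 0 or k > n, the window never closes
lemma A_deg (cs : List Char) (k : Int) (hk : k ≤ 0 ∨ (cs.length : Int) < k) :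
    ∀ r : Nat, r ≤ cs.length →
      (PySem.List.pyRange 0 (r : Int) 1).foldl (pvStepA cs k) (0, 0, 0)
        = (pvW cs r, 0, 0) := by
  intro r
  induction r with
  | zero => intro _; simp [PySem.List.pyRange_one_eq_nil, pvW_zero]
  | succ r ih =>
    intro hr
    have hr' : r < cs.length := by omega
    rw [show ((r + 1 : Nat) : Int) = (r : Int) + 1 by push_cast; ring,
        PySem.List.pyRange_one_succ_right (by positivity), List.foldl_append,
        ih (by omega)]
    simp only [List.foldl_cons, List.foldl_nil, pvStepA]
    have hne : (r : Int) - 0 + 1 ≠ k := by omega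
    simp only [hne, if_false, sub_zero]
    rw [PySem.List.pyGet?_natCast, List.getElem?_eq_getElem hr']
    rw [pvW_succ cs r hr']
    split_ifs with h <;> simp_all

-- main invariant: 1 ≤ k ≤ n; after r steps state = (pvW r - pvW left, pvAnsF (r-k+1), left) with left = max 0 (r-k+1)
lemma A_inv (cs : List Char) (k : Int) (hk1 : 1 ≤ k) (hk2 : k ≤ (cs.length : Int)) :
    ∀ r : Nat, r ≤ cs.length →
      (PySem.List.pyRange 0 (r : Int) 1).foldl (pvStepA cs k) (0, 0, 0)
        = (pvW cs r - pvW cs (max 0 ((r : Int) - k + 1)).toNat,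
           pvAnsF cs k ((r : Int) - k + 1),
           max 0 ((r : Int) - k + 1)) := by
  intro r
  induction r with
  | zero =>
    intro _
    have h1 : max 0 ((0 : Int) - k + 1) = 0 := by omega
    have h2 : pvAnsF cs k ((0 : Int) - k + 1) = 0 := by
      unfold pvAnsF; rw [PySem.List.pyRange_one_eq_nil (by omega)]; rfl
    have h3 : (max 0 (-k + 1)).toNat = 0 := by omega
    simp only [Nat.cast_zero]
    rw [h2]
    simp [PySem.List.pyRange_one_eq_nil, h1, h3, pvW_zero]
    omega
  | succ r ih =>
    intro hr
    have hr' : r < cs.length := by omega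
    rw [show ((r + 1 : Nat) : Int) = (r : Int) + 1 by push_cast; ring,
        PySem.List.pyRange_one_succ_right (by positivity), List.foldl_append,
        ih (by omega)]
    simp only [List.foldl_cons, List.foldl_nil, pvStepA]
    rw [PySem.List.pyGet?_natCast (xs := cs) (n := r), List.getElem?_eq_getElem hr']
    by_cases hc : 0 ≤ (r : Int) + 1 - k
    · -- window closes at right = r
      have hL : max 0 ((r : Int) - k + 1) = (r : Int) - k + 1 := by omega
      have hL2 : max 0 (((r : Int) + 1) - k + 1) = ((r : Int) - k + 1) + 1 := by omega
      have hLnat : ((r : Int) - k + 1).toNat < cs.length := by omega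
      have hgetL : PySem.List.pyGet? cs ((r : Int) - k + 1)
          = some cs[((r : Int) - k + 1).toNat] :=
        PySem.List.pyGet?_eq_some_getElem cs (by omega) (by exact_mod_cast (by omega : (r : Int) - k + 1 < (cs.length : Int)))
      have hWs : pvW cs (r + 1) = pvW cs r + (if cs[r] = 'W' then 1 else 0) := pvW_succ cs r hr'
      have hWL : pvW cs (((r : Int) - k + 1).toNat + 1)
          = pvW cs ((r : Int) - k + 1).toNat
            + (if cs[((r : Int) - k + 1).toNat] = 'W' then 1 else 0) := pvW_succ cs _ hLnat
      have hAns : pvAnsF cs k (((r : Int) + 1) - k + 1)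
          = max (pvAnsF cs k ((r : Int) - k + 1)) (pvW cs (r + 1) - pvW cs ((r : Int) - k + 1).toNat) := by
        rw [show ((r : Int) + 1) - k + 1 = ((r : Int) - k + 1) + 1 by ring,
            pvAnsF_succ cs k _ (by omega),
            show ((r : Int) - k + 1) + k = (r : Int) + 1 by ring,
            show ((r : Int) + 1).toNat = r + 1 by omega]
      rw [hL, if_pos (by ring : (r : Int) - ((r : Int) - k + 1) + 1 = k), hgetL, hL2, hAns]
      have ht : (((r : Int) - k + 1) + 1).toNat = ((r : Int) - k + 1).toNat + 1 := by omega
      rw [ht]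
      split_ifs with h1 h2 h2 <;> simp_all <;> omega
    · -- r + 1 < k : no window yet
      have hL : max 0 ((r : Int) - k + 1) = 0 := by omega
      have hL' : max 0 (((r : Int) + 1) - k + 1) = 0 := by omega
      have hcond : ¬ ((r : Int) - 0 + 1 = k) := by omega
      rw [hL]
      simp only [hcond, if_false, hL', sub_zero]
      have hA : pvAnsF cs k ((r : Int) - k + 1) = pvAnsF cs k (((r : Int) + 1) - k + 1) := by
        unfold pvAnsF
        rw [PySem.List.pyRange_one_eq_nil (by omega), PySem.List.pyRange_one_eq_nil (by omega)]
      rw [← hA, pvW_succ cs r hr']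
      split_ifs with h <;> simp_all <;> omega

-- ===== VERDICT (by name: the statement is the Claim_ definition above) =====
theorem maximumRecolors_spec : Claim_equal_maximumRecolors := by
  intro blocks k _
  show maximumRecolors blocks k = maximumRecolors_alt blocks k
  by_cases h : k ≤ 0 ∨ ((blocks.toList.length : Int)) < k
  · rw [maximumRecolors_eq_fold, A_deg blocks.toList k h blocks.toList.length le_rfl]
    show (0 : Int) = maximumRecolors_alt blocks k
    simp only [maximumRecolors_alt]
    rw [if_pos h]
  · push_neg at h
    rw [maximumRecolors_eq_fold,
        A_inv blocks.toList k (by omega) (by omega) blocks.toList.length le_rfl]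
    show pvAnsF blocks.toList k ((blocks.toList.length : Int) - k + 1) = _
    unfold maximumRecolors_alt
    rw [if_neg (by omega)]
    unfold pvAnsF
    apply PySem.List.foldl_congr_mem
    intro acc i hi
    rw [PySem.List.mem_pyRange_one] at hi
    rw [pvPrefix_get blocks.toList 0 (i + k) (by omega) (by omega),
        pvPrefix_get blocks.toList 0 i (by omega) (by omega)]
    simp
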